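-- pv_equiv track=rewrite | github.com/HyeJuSeon/codingtest-study2 | Hosan/5월19일/124.py | solution
-- ===== SOURCE A (Python) =====
-- def solution(n):
--     dictionary= {1: 1, 2: 2, 0: 4}
--     answer = ''
--     while n:
--         answer += str(dictionary[n % 3])
--         if n % 3 :
--             n = n//3
--         else :
--             n = n//3-1
--     return answer[::-1]
-- ===== SOURCE B (Python) =====
-- def solution(n):
--     if n == 0:
--         return ''
--     r = n % 3
--     if r == 0:
--         return solution(n // 3 - 1) + '4'
--     return solution(n // 3) + str(r)
-- ===== Notes on version B (the rewrite author's own statement) =====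
-- stated objective: simpler
-- what changed: Replaces the iterative digit-accumulate-then-reverse-string loop (with a digit dictionary) by a direct recursive base conversion that prepends digits, so no dictionary and no final reversal are needed.
import Mathlib
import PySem

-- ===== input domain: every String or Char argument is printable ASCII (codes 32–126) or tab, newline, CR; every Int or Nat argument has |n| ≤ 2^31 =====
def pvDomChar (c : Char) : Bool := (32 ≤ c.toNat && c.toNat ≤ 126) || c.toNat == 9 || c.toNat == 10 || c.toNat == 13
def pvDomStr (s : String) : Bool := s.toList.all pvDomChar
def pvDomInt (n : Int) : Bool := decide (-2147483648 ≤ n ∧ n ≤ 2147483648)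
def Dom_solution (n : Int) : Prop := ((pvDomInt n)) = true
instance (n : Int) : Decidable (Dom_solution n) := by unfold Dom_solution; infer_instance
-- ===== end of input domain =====

-- B replaces A's accumulate-then-reverse loop with a direct recursive base conversion (objective: simpler).

-- ===== PORT A =====
-- the while loop of A; the `0 < n` guard makes the port total (Python A never returns for n < 0,
-- those inputs are outside Pre_solution)
def solutionGo (n : Int) (answer : String) : String :=
  if _h : 0 < n then
    let dictionary : PySem.Dict Int Int := PySem.Dict.ofList [(1, 1), (2, 2), (0, 4)]
    let answer := answer ++ PySem.Int.toStr (dictionary.getD (PySem.Int.mod n 3) 0)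
    if PySem.Int.mod n 3 ≠ 0 then
      solutionGo (PySem.Int.floordiv n 3) answer
    else
      solutionGo (PySem.Int.floordiv n 3 - 1) answer
  else answer
termination_by n.toNat
decreasing_by
  · rw [PySem.Int.floordiv_eq_ediv_of_pos (by omega)]; omega
  · rw [PySem.Int.floordiv_eq_ediv_of_pos (by omega)]; omega

def solution (n : Int) : String :=
  (PySem.Str.slice? (solutionGo n "") none none (-1)).getD ""

-- ===== PORT B =====
-- recursive base conversion; `else ""` on negative n is a totality guard (Python B's recursion
-- never returns there; outside Pre_solution)
def solution_alt (n : Int) : String :=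
  if n = 0 then ""
  else if _h : 0 < n then
    let r := PySem.Int.mod n 3
    if r = 0 then solution_alt (PySem.Int.floordiv n 3 - 1) ++ "4"
    else solution_alt (PySem.Int.floordiv n 3) ++ PySem.Int.toStr r
  else ""
termination_by n.toNat
decreasing_by
  · rw [PySem.Int.floordiv_eq_ediv_of_pos (by omega)]; omega
  · rw [PySem.Int.floordiv_eq_ediv_of_pos (by omega)]; omega

-- ===== PRECONDITION & SPEC =====
-- Pre_ excludes n < 0, on which Python A loops forever and Python B's recursion never terminates:
-- neither program returns a value there.
def Pre_solution (n : Int) : Prop := 0 ≤ n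
instance (n : Int) : Decidable (Pre_solution n) := by unfold Pre_solution; infer_instance
def pvWitness_solution : Int := 10

def Spec_solution (n : Int) (out : String) : Prop := out = solution_alt n
instance (n : Int) (out : String) : Decidable (Spec_solution n out) := by unfold Spec_solution; infer_instance

-- ===== CLAIM (what is proved, stated in full; the proofs are below) =====
def Claim_equal_solution : Prop := ∀ (n : Int), Dom_solution n → Pre_solution n → Spec_solution n (solution n)

-- ===== LEMMAS AND PROOFS =====

theorem go_spec (k : Nat) : ∀ (n : Int), n.toNat ≤ k → 0 ≤ n → ∀ (acc : String),
    (solutionGo n acc).toList = acc.toList ++ (solution_alt n).toList.reverse := by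
  induction k with
  | zero =>
    intro n hk hn acc
    have hn0 : n = 0 := by omega
    subst hn0
    rw [solutionGo, solution_alt]
    simp
  | succ k ih =>
    intro n hk hn acc
    by_cases hpos : 0 < n
    · have hq : PySem.Int.floordiv n 3 = n / 3 :=
        PySem.Int.floordiv_eq_ediv_of_pos (by omega)
      have hm : PySem.Int.mod n 3 = n % 3 :=
        PySem.Int.mod_eq_emod_of_pos (by omega)
      rw [solutionGo, solution_alt]
      simp only [hpos, dif_pos, if_neg (by omega : ¬ n = 0)]
      by_cases hr : PySem.Int.mod n 3 = 0
      · have h3 : n % 3 = 0 := by rw [← hm]; exact hr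
        have hdvd : (3:Int) ∣ n := Int.dvd_of_emod_eq_zero h3
        have hge : 3 ≤ n := by omega
        have ha1 : (n / 3 - 1).toNat ≤ k := by omega
        have ha2 : (0:Int) ≤ n / 3 - 1 := by omega
        rw [if_neg (not_not_intro hr), hr, hq, ih (n / 3 - 1) ha1 ha2]
        have hd : PySem.Int.toChars
            ((PySem.Dict.ofList [((1:Int), (1:Int)), (2, 2), (0, 4)]).getD 0 0) = ['4'] := by
          decide
        simp [hd]
      · rw [if_pos hr, hq, ih (n / 3) (by omega) (by omega)]
        have h3 : n % 3 = 1 ∨ n % 3 = 2 := by omega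
        rcases h3 with h3 | h3
        · rw [hm, h3] at hr ⊢
          rw [if_neg (by omega)]
          have hd : PySem.Int.toChars
              ((PySem.Dict.ofList [((1:Int), (1:Int)), (2, 2), (0, 4)]).getD 1 0) = ['1'] := by
            decide
          have ht : (PySem.Int.toStr 1).toList = ['1'] := by decide
          simp [hd, ht]
        · rw [hm, h3] at hr ⊢
          rw [if_neg (by omega)]
          have hd : PySem.Int.toChars
              ((PySem.Dict.ofList [((1:Int), (1:Int)), (2, 2), (0, 4)]).getD 2 0) = ['2'] := by
            decide
          have ht : (PySem.Int.toStr 2).toList = ['2'] := by decide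
          simp [hd, ht]
    · have hn0 : n = 0 := by omega
      subst hn0
      rw [solutionGo, solution_alt]
      simp

-- ===== VERDICT (by name: the statement is the Claim_ definition above) =====
theorem solution_spec : Claim_equal_solution := by
  intro n _ hpre
  unfold Spec_solution solution
  rw [PySem.Str.slice?_none_none_neg_one]
  have h := go_spec n.toNat n le_rfl hpre ""
  simp only [String.toList_empty, List.nil_append] at h
  simp [h]
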